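-- pv_equiv track=rewrite | github.com/PlethoraChutney/Advent-of-Code | 2024/day-07/day-07.py | proper_math_process_line
-- ===== SOURCE A (Python) =====
-- from collections import Counter
--
-- def prime_factors(N):
--     p,i = 2,1
--     while p*p<=N:
--         while N%p == 0:
--             yield p
--             N //= p
--         p,i = p+i,2
--     if N>1: yield N
--
-- def proper_math_process_line(l:tuple[int,list[int]]) -> bool:
--     target = l[0]
--     values = l[1]
--     operators = []
--     primes = Counter(prime_factors(target))
--
--     products_found = []
--     curr_sum = 0
--     while values:
--         curr_sum += values.pop(0)
--         curr_sum_primes = Counter(prime_factors(curr_sum))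
--         if all(primes[k] >= v for k, v in curr_sum_primes.items()):
--             for k, v in curr_sum_primes.items():
--                 primes[k] -= v
--             products_found.append(curr_sum)
--             curr_sum = 0
--             operators.append("*")
--         else:
--             operators.append("+")
--
--     total_value = 1
--     for p in products_found:
--         total_value = total_value * p
--
--     return total_value == target
-- ===== SOURCE B (Python) =====
-- def proper_math_process_line(l: tuple[int, list[int]]) -> bool:
--     # Same return value as A; B does not mutate l[1] and drops prime factorisation:
--     # a single integer `remaining` replaces A's prime Counter.
--     target, values = l
--     remaining = target if target > 1 else 1
--     products_found = []
--     curr_sum = 0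
--     for v in values:
--         curr_sum += v
--         if curr_sum <= 1 or remaining % curr_sum == 0:
--             if curr_sum > 1:
--                 remaining //= curr_sum
--             products_found.append(curr_sum)
--             curr_sum = 0
--     total_value = 1
--     for p in products_found:
--         total_value *= p
--     return total_value == target
-- ===== Notes on version B (the rewrite author's own statement) =====
-- stated objective: faster
-- what changed: Replaces the prime-factorisation Counter bookkeeping (a Counter of prime factors rebuilt for every partial sum, compared and subtracted) by a single integer 'remaining' maintained with one modulo test and one integer division per step, and drops the prime_factors helper and the list.pop(0) mutation.
import Mathlib
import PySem

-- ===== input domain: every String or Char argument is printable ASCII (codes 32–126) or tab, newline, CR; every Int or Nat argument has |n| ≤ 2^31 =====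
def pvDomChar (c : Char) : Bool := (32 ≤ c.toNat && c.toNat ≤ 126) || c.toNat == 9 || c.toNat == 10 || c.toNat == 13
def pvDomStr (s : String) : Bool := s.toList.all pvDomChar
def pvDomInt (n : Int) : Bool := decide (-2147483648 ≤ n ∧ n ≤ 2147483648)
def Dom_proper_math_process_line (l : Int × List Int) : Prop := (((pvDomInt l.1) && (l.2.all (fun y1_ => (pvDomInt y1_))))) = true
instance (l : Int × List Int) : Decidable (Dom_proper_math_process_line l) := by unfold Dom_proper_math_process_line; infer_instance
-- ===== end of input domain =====

-- B drops A's prime-factor Counter for a single integer `remaining` (one modulo + one division per step).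
-- A pops from l[1] in place; B does not mutate it — the equivalence proved here is about the RETURN value.

-- ===== PORT A =====
-- inner `while N % p == 0: yield p; N //= p` of prime_factors; fuel only guards termination (|N| shrinks at each division)
def pfDiv (fuel : Nat) (p N : Int) : List Int × Int :=
  match fuel with
  | 0 => ([], N)
  | fuel + 1 =>
    if PySem.Int.mod N p = 0 then
      let r := pfDiv fuel p (PySem.Int.floordiv N p)
      (p :: r.1, r.2)
    else ([], N)

-- outer `while p*p <= N` loop of prime_factors (p,i = p+i,2); fuel only guards termination (p grows each iteration)
def pfLoop (fuel : Nat) (p i N : Int) (acc : List Int) : List Int :=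
  match fuel with
  | 0 => acc
  | fuel + 1 =>
    if p * p ≤ N then
      let r := pfDiv N.natAbs p N
      pfLoop fuel (p + i) 2 r.2 (acc ++ r.1)
    else if 1 < N then acc ++ [N] else acc

def prime_factors (N : Int) : List Int := pfLoop N.natAbs 2 1 N []

-- the `while values:` loop of A (returns products_found; the unused `operators` list is dropped)
def aLoop (values : List Int) (primes : PySem.Dict Int Int) (products : List Int) (curr : Int) : List Int :=
  match values with
  | [] => products
  | v :: vs =>
    let c := curr + v
    let cp := PySem.Dict.counter (prime_factors c)
    if cp.items.all (fun kv => decide (primes.getD kv.1 0 ≥ kv.2)) then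
      aLoop vs (cp.items.foldl (fun d kv => d.insert kv.1 (d.getD kv.1 0 - kv.2)) primes) (products ++ [c]) 0
    else
      aLoop vs primes products c

def proper_math_process_line (l : Int × List Int) : Bool :=
  let target := l.1
  let primes := PySem.Dict.counter (prime_factors target)
  let products_found := aLoop l.2 primes [] 0
  (products_found.foldl (fun t p => t * p) 1) == target

-- ===== PORT B =====
-- the `for v in values:` loop of B: remaining replaces the Counter
def bLoop (values : List Int) (remaining : Int) (products : List Int) (curr : Int) : List Int :=
  match values with
  | [] => products
  | v :: vs =>
    let c := curr + v
    if c ≤ 1 ∨ PySem.Int.mod remaining c = 0 then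
      bLoop vs (if 1 < c then PySem.Int.floordiv remaining c else remaining) (products ++ [c]) 0
    else
      bLoop vs remaining products c

def proper_math_process_line_alt (l : Int × List Int) : Bool :=
  let target := l.1
  let remaining := if 1 < target then target else 1
  let products_found := bLoop l.2 remaining [] 0
  (products_found.foldl (fun t p => t * p) 1) == target

-- ===== PRECONDITION & SPEC =====
def Spec_proper_math_process_line (l : Int × List Int) (out : Bool) : Prop := out = proper_math_process_line_alt l
instance (l : Int × List Int) (out : Bool) : Decidable (Spec_proper_math_process_line l out) := by unfold Spec_proper_math_process_line; infer_instance

-- ===== CLAIM (what is proved, stated in full; the proofs are below) =====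
def Claim_equal_proper_math_process_line : Prop := ∀ (l : Int × List Int), Dom_proper_math_process_line l → Spec_proper_math_process_line l (proper_math_process_line l)

-- ===== LEMMAS AND PROOFS =====

-- prime_factors of anything ≤ 1 is empty
lemma pf_nonpos (N : Int) (h : N ≤ 1) : prime_factors N = [] := by
  unfold prime_factors
  cases hn : N.natAbs with
  | zero => rfl
  | succ k => simp only [pfLoop]; rw [if_neg (by omega), if_neg (by omega)]

-- the accumulator of the tail-recursive outer loop just prepends
lemma pfLoop_append : ∀ (fuel : Nat) (p i N : Int) (acc : List Int),
    pfLoop fuel p i N acc = acc ++ pfLoop fuel p i N [] := by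
  intro fuel
  induction fuel with
  | zero => intro p i N acc; simp [pfLoop]
  | succ fuel ih =>
    intro p i N acc
    simp only [pfLoop]
    by_cases hle : p * p ≤ N
    · rw [if_pos hle, if_pos hle, ih _ _ _ (acc ++ _), ih _ _ _ ([] ++ _)]
      simp
    · by_cases hN : 1 < N
      · rw [if_neg hle, if_neg hle, if_pos hN, if_pos hN]
        simp
      · rw [if_neg hle, if_neg hle, if_neg hN, if_neg hN]
        simp

-- spec of the inner division loop
lemma pfDiv_spec : ∀ (fuel : Nat) (p N : Int), 2 ≤ p → 1 ≤ N → N.natAbs ≤ fuel →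
    (pfDiv fuel p N).1.prod * (pfDiv fuel p N).2 = N ∧
    (∀ x ∈ (pfDiv fuel p N).1, x = p) ∧
    ¬ (p ∣ (pfDiv fuel p N).2) ∧ 1 ≤ (pfDiv fuel p N).2 ∧ (pfDiv fuel p N).2 ∣ N := by
  intro fuel
  induction fuel with
  | zero => intro p N hp hN hf; omega
  | succ fuel ih =>
    intro p N hp hN hf
    by_cases hmod : PySem.Int.mod N p = 0
    · have hdvd : p ∣ N := (PySem.Int.mod_eq_zero_iff_dvd N p).mp hmod
      obtain ⟨m, hm⟩ := hdvd
      have hp0 : (0:Int) < p := by omega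
      have hfd : PySem.Int.floordiv N p = m := by
        rw [PySem.Int.floordiv_eq_ediv_of_pos hp0, hm, Int.mul_ediv_cancel_left _ (by omega)]
      have hm1 : 1 ≤ m := by nlinarith
      have hmN : m < N := by nlinarith
      have hspec := ih p m hp hm1 (by omega)
      have hstep : pfDiv (fuel + 1) p N = (p :: (pfDiv fuel p m).1, (pfDiv fuel p m).2) := by
        simp only [pfDiv, if_pos hmod, hfd]
      rw [hstep]
      obtain ⟨h1, h2, h3, h4, h5⟩ := hspec
      refine ⟨by rw [List.prod_cons, mul_assoc, h1]; exact hm.symm, ?_, h3, h4, ?_⟩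
      · intro x hx
        rcases List.mem_cons.mp hx with h | h
        · exact h
        · exact h2 x h
      · exact h5.trans ⟨p, by rw [hm, mul_comm]⟩
    · have hstep : pfDiv (fuel + 1) p N = ([], N) := by
        simp only [pfDiv, if_neg hmod]
      rw [hstep]
      refine ⟨by simp, by simp, ?_, hN, dvd_refl N⟩
      intro hdvd
      exact hmod ((PySem.Int.mod_eq_zero_iff_dvd N p).mpr hdvd)

-- spec of the outer loop: all yielded factors are primes, their product is N
lemma pfLoop_spec : ∀ (fuel : Nat) (p i N : Int), 1 ≤ N → 2 ≤ p →
    ((p = 2 ∧ i = 1) ∨ (3 ≤ p ∧ p % 2 = 1 ∧ i = 2)) →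
    (∀ q : Int, 2 ≤ q → q < p → ¬ q ∣ N) →
    (N + 1 - p).toNat < fuel →
    (pfLoop fuel p i N []).prod = N ∧ ∀ x ∈ pfLoop fuel p i N [], 2 ≤ x ∧ x.toNat.Prime := by
  intro fuel
  induction fuel with
  | zero => intro p i N hN hp hpi hinv hf; omega
  | succ fuel ih =>
    intro p i N hN hp hpi hinv hf
    by_cases hle : p * p ≤ N
    · have hpN : p < N := by nlinarith
      obtain ⟨hprod, helem, hnd, hr1, hrdvd⟩ := pfDiv_spec N.natAbs p N hp hN le_rfl
      have hN2le : (pfDiv N.natAbs p N).2 ≤ N := Int.le_of_dvd (by omega) hrdvd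
      have hpi' : ((p + i = 2 ∧ (2:Int) = 1) ∨ (3 ≤ p + i ∧ (p + i) % 2 = 1 ∧ (2:Int) = 2)) := by
        rcases hpi with ⟨hp2, hi1⟩ | ⟨hp3, hodd, hi2⟩ <;> [right; right] <;> omega
      have hinv' : ∀ q : Int, 2 ≤ q → q < p + i → ¬ q ∣ (pfDiv N.natAbs p N).2 := by
        intro q h2q hqpi hqdvd
        have hqN : q ∣ N := hqdvd.trans hrdvd
        rcases lt_trichotomy q p with h | h | h
        · exact hinv q h2q h hqN
        · exact hnd (h ▸ hqdvd)
        · rcases hpi with ⟨hp2, hi1⟩ | ⟨hp3, hodd, hi2⟩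
          · omega
          · have h2q' : (2:Int) ∣ q := by omega
            exact hinv 2 (by omega) (by omega) (h2q'.trans hqN)
      have hrec := ih (p + i) 2 (pfDiv N.natAbs p N).2 hr1 (by omega) hpi' hinv' (by omega)
      have hstep : pfLoop (fuel + 1) p i N []
          = (pfDiv N.natAbs p N).1 ++ pfLoop fuel (p + i) 2 (pfDiv N.natAbs p N).2 [] := by
        simp only [pfLoop, if_pos hle]
        rw [pfLoop_append]
        simp
      rw [hstep]
      constructor
      · rw [List.prod_append, hrec.1, hprod]
      · intro x hx
        rcases List.mem_append.mp hx with h | h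
        · have hxp : x = p := helem x h
          rw [hxp]
          have hdvdN : p ∣ N := (hxp ▸ List.dvd_prod h).trans ⟨(pfDiv N.natAbs p N).2, hprod.symm⟩
          refine ⟨hp, Nat.prime_def_lt.mpr ⟨by omega, fun m hm hmdvd => ?_⟩⟩
          by_contra hm1
          have hm0 : m ≠ 0 := by rintro rfl; simp at hmdvd; omega
          have h2m : 2 ≤ m := by omega
          have hmx : (m : Int) ∣ p := by
            have := Int.natCast_dvd_natCast.mpr hmdvd
            rwa [Int.toNat_of_nonneg (by omega)] at this
          exact hinv m (by omega) (by omega) (hmx.trans hdvdN)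
        · exact hrec.2 x h
    · by_cases hN1 : 1 < N
      · have hstep : pfLoop (fuel + 1) p i N [] = [N] := by
          simp only [pfLoop, if_neg hle, if_pos hN1]
          simp
        rw [hstep]
        refine ⟨by simp, ?_⟩
        intro x hx
        rw [List.mem_singleton] at hx
        subst hx
        refine ⟨by omega, ?_⟩
        by_contra hnp
        have hq := Nat.minFac_prime (show x.toNat ≠ 1 by omega)
        have hq2 : 2 ≤ x.toNat.minFac := hq.two_le
        have hqd : x.toNat.minFac ∣ x.toNat := Nat.minFac_dvd _
        have hsq : x.toNat.minFac ^ 2 ≤ x.toNat := Nat.minFac_sq_le_self (by omega) hnp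
        have hqdZ : (x.toNat.minFac : Int) ∣ x := by
          have := Int.natCast_dvd_natCast.mpr hqd
          rwa [Int.toNat_of_nonneg (by omega)] at this
        have hxZ : ((x.toNat : Int)) = x := Int.toNat_of_nonneg (by omega)
        have hsqZ : (x.toNat.minFac : Int) * (x.toNat.minFac : Int) ≤ x := by
          have : ((x.toNat.minFac ^ 2 : Nat) : Int) ≤ ((x.toNat : Nat) : Int) := Int.ofNat_le.mpr hsq
          rw [hxZ] at this
          nlinarith [this]
        have hqp : (x.toNat.minFac : Int) < p := by nlinarith
        exact hinv _ (by omega) hqp hqdZ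
      · have hN1' : N = 1 := by omega
        have hstep : pfLoop (fuel + 1) p i N [] = [] := by
          simp only [pfLoop, if_neg hle, if_neg hN1]
        rw [hstep]
        exact ⟨by simp [hN1'], by simp⟩

lemma pf_spec (N : Int) (h : 1 ≤ N) :
    (prime_factors N).prod = N ∧ ∀ x ∈ prime_factors N, 2 ≤ x ∧ x.toNat.Prime := by
  unfold prime_factors
  exact pfLoop_spec N.natAbs 2 1 N h le_rfl (Or.inl ⟨rfl, rfl⟩) (fun q h2 hq => by omega) (by omega)

-- the product of nonnegative ints maps through toNat
lemma prod_toNat (l : List Int) (h : ∀ x ∈ l, 0 ≤ x) : (l.map Int.toNat).prod = l.prod.toNat := by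
  induction l with
  | nil => simp
  | cons a l ih =>
    have ha : 0 ≤ a := h a List.mem_cons_self
    have hl : 0 ≤ l.prod := List.prod_nonneg (fun x hx => h x (List.mem_cons_of_mem a hx))
    simp only [List.map_cons, List.prod_cons, ih (fun x hx => h x (List.mem_cons_of_mem a hx))]
    rw [Int.toNat_mul ha hl]

lemma pf_perm (N : Int) (h : 1 ≤ N) :
    ((prime_factors N).map Int.toNat).Perm N.toNat.primeFactorsList := by
  obtain ⟨hprod, helem⟩ := pf_spec N h
  refine Nat.primeFactorsList_unique ?_ ?_
  · rw [prod_toNat _ (fun x hx => by have := (helem x hx).1; omega), hprod]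
  · intro q hq
    obtain ⟨x, hx, hxq⟩ := List.mem_map.mp hq
    exact hxq ▸ (helem x hx).2

-- counting a key in prime_factors is the factorization exponent
lemma count_pf (N : Int) (h : 1 ≤ N) (k : Int) :
    (prime_factors N).count k = N.toNat.factorization k.toNat := by
  obtain ⟨hprod, helem⟩ := pf_spec N h
  rw [← Nat.primeFactorsList_count_eq, ← (pf_perm N h).count_eq]
  by_cases hk : 0 ≤ k
  · have hmapid : (prime_factors N).map (fun x => ((x.toNat : Nat) : Int)) = prime_factors N := by
      apply List.map_congr_left ?_ |>.trans (List.map_id _)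
      intro x hx
      exact Int.toNat_of_nonneg (by have := (helem x hx).1; omega)
    conv_lhs => rw [← hmapid]
    have hcast : (fun x => ((x.toNat : Nat) : Int)) = (fun n : Nat => (n : Int)) ∘ Int.toNat := rfl
    rw [hcast, ← List.map_map, ← Int.toNat_of_nonneg hk,
      List.count_map_of_injective _ _ (fun a b => by omega)]
    congr 1
  · rw [List.count_eq_zero.mpr, List.count_eq_zero.mpr]
    · intro hmem
      obtain ⟨x, hx, hxk⟩ := List.mem_map.mp hmem
      have := (helem x hx).1
      omega
    · intro hmem
      have := (helem k hmem).1
      omega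

-- the Counter-domination test is exactly divisibility
lemma cond_iff (c r : Int) (hc : 2 ≤ c) (hr : 1 ≤ r) :
    (∀ k ∈ prime_factors c,
        ((prime_factors c).count k : Int) ≤ ((prime_factors r).count k : Int)) ↔ c ∣ r := by
  have hc1 : (1:Int) ≤ c := by omega
  have hcN : c = ((c.toNat : Nat) : Int) := (Int.toNat_of_nonneg (by omega)).symm
  have hrN : r = ((r.toNat : Nat) : Int) := (Int.toNat_of_nonneg (by omega)).symm
  constructor
  · intro hcond
    rw [hcN, hrN, Int.natCast_dvd_natCast]
    rw [← Nat.factorization_le_iff_dvd (by omega) (by omega), Finsupp.le_def]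
    intro q
    by_cases hq : c.toNat.factorization q = 0
    · omega
    · have hmem : q ∈ c.toNat.primeFactorsList := by
        rw [← List.count_pos_iff, Nat.primeFactorsList_count_eq]
        omega
      have hmem' : q ∈ (prime_factors c).map Int.toNat := (pf_perm c hc1).mem_iff.mpr hmem
      obtain ⟨x, hx, hxq⟩ := List.mem_map.mp hmem'
      have hcount := hcond x hx
      rw [count_pf c hc1 x, count_pf r hr x, hxq] at hcount
      omega
  · intro hdvd k _
    rw [count_pf c hc1 k, count_pf r hr k]
    have : c.toNat ∣ r.toNat := by rwa [hcN, hrN, Int.natCast_dvd_natCast] at hdvd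
    have hle := (Nat.factorization_le_iff_dvd (by omega) (by omega)).mpr this
    exact_mod_cast Finsupp.le_def.mp hle k.toNat

-- counts after dividing out c
lemma count_pf_div (c r : Int) (hc : 2 ≤ c) (hr : 1 ≤ r) (hdvd : c ∣ r) (k : Int) :
    ((prime_factors (PySem.Int.floordiv r c)).count k : Int)
      = ((prime_factors r).count k : Int) - ((prime_factors c).count k : Int) := by
  have hc1 : (1:Int) ≤ c := by omega
  obtain ⟨m, hm⟩ := hdvd
  have hm1 : 1 ≤ m := by nlinarith
  have hfd : PySem.Int.floordiv r c = m := by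
    rw [PySem.Int.floordiv_eq_ediv_of_pos (by omega), hm, Int.mul_ediv_cancel_left _ (by omega)]
  have hdvdN : c.toNat ∣ r.toNat := by
    refine ⟨m.toNat, ?_⟩
    rw [← Int.toNat_mul (by omega) (by omega), ← hm]
  have hmN : m.toNat = r.toNat / c.toNat := by
    rw [hm, Int.toNat_mul (by omega) (by omega), Nat.mul_div_cancel_left _ (by omega)]
  have hfact := Nat.factorization_div hdvdN
  have hle := (Nat.factorization_le_iff_dvd (by omega) (by omega)).mpr hdvdN
  have hptw := Finsupp.le_def.mp hle k.toNat
  rw [hfd, count_pf m hm1 k, count_pf r hr k, count_pf c hc1 k, hmN, hfact,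
    Finsupp.tsub_apply]
  omega

-- the Counter-subtraction fold, key by key
lemma getD_fold_sub (ks : List Int) (f : Int → Int) (D : PySem.Dict Int Int) (hnd : ks.Nodup) (x : Int) :
    ((ks.map (fun k => (k, f k))).foldl (fun d kv => d.insert kv.1 (d.getD kv.1 0 - kv.2)) D).getD x 0
      = D.getD x 0 - (if x ∈ ks then f x else 0) := by
  induction ks generalizing D with
  | nil => simp
  | cons k ks ih =>
    have hnd' : ks.Nodup := (List.nodup_cons.mp hnd).2
    have hknot : k ∉ ks := (List.nodup_cons.mp hnd).1
    simp only [List.map_cons, List.foldl_cons]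
    rw [ih _ hnd']
    rw [PySem.Dict.getD_insert]
    by_cases hxk : x = k
    · subst hxk
      rw [if_pos rfl, if_neg hknot, if_pos List.mem_cons_self]
      ring
    · rw [if_neg hxk]
      by_cases hxm : x ∈ ks
      · rw [if_pos hxm, if_pos (List.mem_cons_of_mem k hxm)]
      · rw [if_neg hxm, if_neg (by simp [hxk, hxm])]

-- the two loops agree whenever the dict is the counter of remaining's factor list
lemma loop_eq : ∀ (vs : List Int) (D : PySem.Dict Int Int) (r : Int) (products : List Int) (curr : Int),
    1 ≤ r → (∀ k, D.getD k 0 = ((prime_factors r).count k : Int)) →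
    aLoop vs D products curr = bLoop vs r products curr := by
  intro vs
  induction vs with
  | nil => intros; rfl
  | cons v vs ih =>
    intro D r products curr hr hinv
    by_cases hc : curr + v ≤ 1
    · have hpfc : prime_factors (curr + v) = [] := pf_nonpos _ hc
      have hcnt : PySem.Dict.counter (prime_factors (curr + v)) = PySem.Dict.empty := by
        rw [hpfc]; rfl
      have hA : aLoop (v :: vs) D products curr = aLoop vs D (products ++ [curr + v]) 0 := by
        simp only [aLoop]
        rw [hcnt]
        simp [PySem.Dict.empty]
      have hB : bLoop (v :: vs) r products curr = bLoop vs r (products ++ [curr + v]) 0 := by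
        simp only [bLoop]
        rw [if_pos (Or.inl hc), if_neg (by omega)]
      rw [hA, hB]
      exact ih D r _ 0 hr hinv
    · have hc2 : 2 ≤ curr + v := by omega
      have hitems := PySem.Dict.items_counter (prime_factors (curr + v))
      have hallIff :
          ((PySem.Dict.counter (prime_factors (curr + v))).items.all
            (fun kv => decide (D.getD kv.1 0 ≥ kv.2)) = true) ↔ (curr + v) ∣ r := by
        rw [hitems, List.all_eq_true, ← cond_iff (curr + v) r hc2 hr]
        constructor
        · intro h k hk
          have := h (k, ((prime_factors (curr + v)).count k : Int))
            (List.mem_map.mpr ⟨k, (PySem.Set.mem_ofList _ _).mpr hk, rfl⟩)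
          rw [hinv k] at this
          simpa using this
        · intro h kv hkv
          obtain ⟨k, hk, rfl⟩ := List.mem_map.mp hkv
          have := h k ((PySem.Set.mem_ofList _ _).mp hk)
          rw [← hinv k] at this
          simpa using this
      by_cases hdvd : (curr + v) ∣ r
      · have hall := hallIff.mpr hdvd
        have hmod : PySem.Int.mod r (curr + v) = 0 := (PySem.Int.mod_eq_zero_iff_dvd r _).mpr hdvd
        have hA : aLoop (v :: vs) D products curr
            = aLoop vs ((PySem.Dict.counter (prime_factors (curr + v))).items.foldl
                (fun d kv => d.insert kv.1 (d.getD kv.1 0 - kv.2)) D) (products ++ [curr + v]) 0 := by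
          simp only [aLoop, hall, if_true]
        have hB : bLoop (v :: vs) r products curr
            = bLoop vs (PySem.Int.floordiv r (curr + v)) (products ++ [curr + v]) 0 := by
          simp only [bLoop]
          rw [if_pos (Or.inr hmod), if_pos (by omega)]
        rw [hA, hB]
        obtain ⟨m, hm⟩ := hdvd
        have hm1 : 1 ≤ m := by nlinarith
        have hfd : PySem.Int.floordiv r (curr + v) = m := by
          rw [PySem.Int.floordiv_eq_ediv_of_pos (by omega), hm,
            Int.mul_ediv_cancel_left _ (by omega)]
        refine ih _ _ _ 0 (by omega) ?_
        intro x
        rw [hitems, getD_fold_sub _ _ _ (PySem.Set.nodup_ofList _) x]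
        have hcnt := count_pf_div (curr + v) r hc2 hr ⟨m, hm⟩ x
        by_cases hxm : x ∈ prime_factors (curr + v)
        · rw [if_pos ((PySem.Set.mem_ofList _ _).mpr hxm), hinv x, ← hcnt]
        · rw [if_neg (fun hmem => hxm ((PySem.Set.mem_ofList _ _).mp hmem)), hinv x,
            List.count_eq_zero.mpr hxm] at *
          omega
      · have hall : ((PySem.Dict.counter (prime_factors (curr + v))).items.all
            (fun kv => decide (D.getD kv.1 0 ≥ kv.2))) = false := by
          rw [← Bool.not_eq_true]
          exact fun h => hdvd (hallIff.mp h)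
        have hmod : ¬ PySem.Int.mod r (curr + v) = 0 :=
          fun h => hdvd ((PySem.Int.mod_eq_zero_iff_dvd r _).mp h)
        have hA : aLoop (v :: vs) D products curr = aLoop vs D products (curr + v) := by
          simp only [aLoop, hall, Bool.false_eq_true, if_false]
        have hB : bLoop (v :: vs) r products curr = bLoop vs r products (curr + v) := by
          simp only [bLoop]
          rw [if_neg (by tauto)]
        rw [hA, hB]
        exact ih D r _ _ hr hinv

-- ===== VERDICT (by name: the statement is the Claim_ definition above) =====
theorem proper_math_process_line_spec : Claim_equal_proper_math_process_line := by
  intro l _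
  unfold Spec_proper_math_process_line proper_math_process_line proper_math_process_line_alt
  simp only []
  suffices h : aLoop l.2 (PySem.Dict.counter (prime_factors l.1)) [] 0
      = bLoop l.2 (if 1 < l.1 then l.1 else 1) [] 0 by rw [h]
  by_cases ht : 1 < l.1
  · rw [if_pos ht]
    exact loop_eq l.2 _ l.1 [] 0 (by omega) (fun k => PySem.Dict.getD_counter _ _)
  · rw [if_neg ht]
    refine loop_eq l.2 _ 1 [] 0 (by omega) ?_
    intro k
    rw [PySem.Dict.getD_counter, pf_nonpos l.1 (by omega), pf_nonpos 1 (by omega)]
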